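-- pv_equiv track=rewrite | github.com/bigchillynick-dot/clip-that-highlights | app.py | get_top_hype_moments
-- ===== SOURCE A (Python) =====
-- def get_top_hype_moments(hype_scores, clip_length=15, max_clips=100):
--     sorted_scores = sorted(hype_scores.items(), key=lambda x: x[1], reverse=True)
--     selected = []
--     used = set()
--
--     for second, score in sorted_scores:
--         if len(selected) >= max_clips:
--             break
--         if all(abs(second - s) > clip_length for s in used):
--             selected.append(second)
--             used.add(second)
--     return sorted(selected)
-- ===== SOURCE B (Python) =====
-- import bisect
--
--
-- def get_top_hype_moments(hype_scores, clip_length=15, max_clips=100):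
--     # Same greedy choice, but the selected seconds are kept in a sorted list:
--     # a bisect gives the two nearest neighbours, so the spacing test is O(log k)
--     # instead of a scan over every already-selected second, and the final sort
--     # disappears (the list is already in order).
--     order = sorted(hype_scores.items(), key=lambda x: x[1], reverse=True)
--     chosen = []
--     for second, _score in order:
--         if len(chosen) >= max_clips:
--             break
--         i = bisect.bisect_left(chosen, second)
--         if i > 0 and second - chosen[i - 1] <= clip_length:
--             continue
--         if i < len(chosen) and chosen[i] - second <= clip_length:
--             continue
--         chosen.insert(i, second)
--     return chosen
-- ===== Notes on version B (the rewrite author's own statement) =====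
-- stated objective: faster
-- what changed: The selected seconds are kept in a sorted list and each candidate's spacing is tested against its two bisect-found nearest neighbours instead of rescanning the whole selected set, and the final sort disappears because the list is maintained in order.
import Mathlib
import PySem

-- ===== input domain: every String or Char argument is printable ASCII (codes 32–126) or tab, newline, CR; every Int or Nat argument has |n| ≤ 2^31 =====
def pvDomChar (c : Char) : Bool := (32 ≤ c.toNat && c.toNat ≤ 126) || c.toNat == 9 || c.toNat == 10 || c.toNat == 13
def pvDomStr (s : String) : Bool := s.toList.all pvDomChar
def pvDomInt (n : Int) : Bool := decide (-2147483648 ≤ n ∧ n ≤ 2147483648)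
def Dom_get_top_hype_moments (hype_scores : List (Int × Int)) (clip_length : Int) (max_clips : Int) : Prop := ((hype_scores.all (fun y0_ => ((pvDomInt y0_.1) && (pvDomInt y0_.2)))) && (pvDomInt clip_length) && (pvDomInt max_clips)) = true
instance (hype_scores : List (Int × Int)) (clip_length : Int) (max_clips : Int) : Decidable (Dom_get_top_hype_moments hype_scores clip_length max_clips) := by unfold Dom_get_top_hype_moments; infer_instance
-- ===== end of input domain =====

-- B keeps the selected seconds in a sorted list and tests spacing against the two
-- bisect-found nearest neighbours instead of rescanning the whole selected set (faster).


-- ===== PORT A =====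
-- one iteration of A's for-loop over (selected, used); Python's 'break' freezes the
-- state once len(selected) >= max_clips, which stays true for all later iterations
def hypeStep (clip_length max_clips : Int) (st : List Int × PySem.Set Int) (p : Int × Int) :
    List Int × PySem.Set Int :=
  if (st.1.length : Int) ≥ max_clips then st
  else if st.2.all (fun s => decide (|p.1 - s| > clip_length)) then
    (st.1 ++ [p.1], PySem.Set.add st.2 p.1)
  else st

def get_top_hype_moments (hype_scores : List (Int × Int)) (clip_length : Int) (max_clips : Int) : List Int :=
  let sorted_scores := PySem.List.sorted (PySem.Dict.ofList hype_scores).items (fun x => x.2) true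
  let final := sorted_scores.foldl (hypeStep clip_length max_clips) ([], PySem.Set.empty)
  PySem.List.sorted final.1 (fun x => x) false

-- ===== PORT B =====
-- B's loop: chosen is kept sorted; bisect_left finds the insertion point, the two
-- neighbours chosen[i-1] and chosen[i] are the only spacing tests needed
def hypeAltGo (clip_length max_clips : Int) : List (Int × Int) → List Int → List Int
  | [], chosen => chosen
  | p :: rest, chosen =>
    if (chosen.length : Int) ≥ max_clips then chosen
    else
      let i := PySem.List.bisectLeft chosen p.1
      if 0 < i ∧ p.1 - chosen.getD (i - 1) 0 ≤ clip_length then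
        hypeAltGo clip_length max_clips rest chosen
      else if i < chosen.length ∧ chosen.getD i 0 - p.1 ≤ clip_length then
        hypeAltGo clip_length max_clips rest chosen
      else
        hypeAltGo clip_length max_clips rest (PySem.List.insert chosen (i : Int) p.1)

def get_top_hype_moments_alt (hype_scores : List (Int × Int)) (clip_length : Int) (max_clips : Int) : List Int :=
  hypeAltGo clip_length max_clips
    (PySem.List.sorted (PySem.Dict.ofList hype_scores).items (fun x => x.2) true) []

-- ===== PRECONDITION & SPEC =====
def Spec_get_top_hype_moments (hype_scores : List (Int × Int)) (clip_length : Int) (max_clips : Int) (out : List Int) : Prop := out = get_top_hype_moments_alt hype_scores clip_length max_clips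
instance (hype_scores : List (Int × Int)) (clip_length : Int) (max_clips : Int) (out : List Int) : Decidable (Spec_get_top_hype_moments hype_scores clip_length max_clips out) := by unfold Spec_get_top_hype_moments; infer_instance

-- ===== CLAIM (what is proved, stated in full; the proofs are below) =====
def Claim_equal_get_top_hype_moments : Prop := ∀ (hype_scores : List (Int × Int)) (clip_length : Int) (max_clips : Int), Dom_get_top_hype_moments hype_scores clip_length max_clips → Spec_get_top_hype_moments hype_scores clip_length max_clips (get_top_hype_moments hype_scores clip_length max_clips)

-- ===== LEMMAS AND PROOFS =====

-- once len(selected) ≥ max_clips, A's loop never changes the state again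
theorem hypeStep_frozen (L M : Int) (l : List (Int × Int)) (st : List Int × PySem.Set Int)
    (h : (st.1.length : Int) ≥ M) : l.foldl (hypeStep L M) st = st := by
  induction l with
  | nil => rfl
  | cons p rest ih => simp only [List.foldl_cons, hypeStep, if_pos h]; exact ih

-- on a sorted list, "all selected seconds are farther than L" is exactly
-- "both bisect neighbours are farther than L"
theorem far_iff (cs : List Int) (x L : Int) (hs : cs.Pairwise (· ≤ ·)) :
    (∀ s ∈ cs, |x - s| > L) ↔
      (¬(0 < PySem.List.bisectLeft cs x ∧
          x - cs.getD (PySem.List.bisectLeft cs x - 1) 0 ≤ L) ∧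
       ¬(PySem.List.bisectLeft cs x < cs.length ∧
          cs.getD (PySem.List.bisectLeft cs x) 0 - x ≤ L)) := by
  obtain ⟨hle, hlt, hge⟩ := PySem.List.bisectLeft_spec cs x hs
  set i := PySem.List.bisectLeft cs x with hi
  constructor
  · intro h
    constructor
    · rintro ⟨h0, hcl⟩
      have hidx : i - 1 < cs.length := by omega
      rw [List.getD_eq_getElem cs 0 hidx] at hcl
      have h1 := h (cs[i-1]'hidx) (List.getElem_mem hidx)
      have h2 := hlt (i-1) hidx (by omega)
      rw [gt_iff_lt, lt_abs] at h1
      omega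
    · rintro ⟨h0, hcl⟩
      rw [List.getD_eq_getElem cs 0 h0] at hcl
      have h1 := h (cs[i]'h0) (List.getElem_mem h0)
      have h2 := hge i h0 (le_refl i)
      rw [gt_iff_lt, lt_abs] at h1
      omega
  · rintro ⟨h1, h2⟩ s hmem
    obtain ⟨j, hj, rfl⟩ := List.mem_iff_getElem.mp hmem
    rw [gt_iff_lt, lt_abs]
    by_cases hcase : j < i
    · have h0 : 0 < i := by omega
      have hidx : i - 1 < cs.length := by omega
      rw [List.getD_eq_getElem cs 0 hidx] at h1
      have hfar : L < x - cs[i-1]'hidx := by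
        by_contra hc; exact h1 ⟨h0, by omega⟩
      have hmono : cs[j]'hj ≤ cs[i-1]'hidx := by
        rcases eq_or_lt_of_le (by omega : j ≤ i - 1) with heq | hlt'
        · subst heq; exact le_refl _
        · exact (List.pairwise_iff_getElem.mp hs) j (i-1) hj hidx hlt'
      omega
    · have hilen : i < cs.length := by omega
      rw [List.getD_eq_getElem cs 0 hilen] at h2
      have hfar : L < cs[i]'hilen - x := by
        by_contra hc; exact h2 ⟨hilen, by omega⟩
      have hmono : cs[i]'hilen ≤ cs[j]'hj := by
        rcases eq_or_lt_of_le (by omega : i ≤ j) with heq | hlt'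
        · subst heq; exact le_refl _
        · exact (List.pairwise_iff_getElem.mp hs) i j hilen hj hlt'
      omega

-- inserting at the bisect_left point keeps the list sorted
theorem insert_bisect_pairwise (cs : List Int) (x : Int) (hs : cs.Pairwise (· ≤ ·)) :
    (PySem.List.insert cs ((PySem.List.bisectLeft cs x : Nat) : Int) x).Pairwise (· ≤ ·) := by
  obtain ⟨hle, hlt, hge⟩ := PySem.List.bisectLeft_spec cs x hs
  set i := PySem.List.bisectLeft cs x with hi
  rw [PySem.List.insert_natCast cs i x hle]
  rw [List.pairwise_append]
  refine ⟨hs.sublist (List.take_sublist i cs), ?_, ?_⟩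
  · rw [List.pairwise_cons]
    refine ⟨?_, hs.sublist (List.drop_sublist i cs)⟩
    intro b hb
    obtain ⟨k, hk, rfl⟩ := List.mem_iff_getElem.mp hb
    have hk' : i + k < cs.length := by simp only [List.length_drop] at hk; omega
    rw [List.getElem_drop]
    exact hge (i + k) hk' (by omega)
  · intro a ha b hb
    obtain ⟨j, hj, rfl⟩ := List.mem_iff_getElem.mp ha
    have hjlen : j < cs.length := by simp only [List.length_take] at hj; omega
    have hji : j < i := by simp only [List.length_take] at hj; omega
    rw [List.getElem_take]
    have hax : cs[j]'hjlen < x := hlt j hjlen hji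
    rcases List.mem_cons.mp hb with rfl | hb'
    · omega
    · obtain ⟨k, hk, rfl⟩ := List.mem_iff_getElem.mp hb'
      have hk' : i + k < cs.length := by simp only [List.length_drop] at hk; omega
      rw [List.getElem_drop]
      have := hge (i + k) hk' (by omega)
      omega

-- the inserted list is a permutation of x :: c
theorem insert_bisect_perm (cs : List Int) (x : Int) (hle : PySem.List.bisectLeft cs x ≤ cs.length) :
    (PySem.List.insert cs ((PySem.List.bisectLeft cs x : Nat) : Int) x).Perm (x :: cs) := by
  rw [PySem.List.insert_natCast cs _ x hle]
  calc (List.take (PySem.List.bisectLeft cs x) cs ++ x :: List.drop (PySem.List.bisectLeft cs x) cs).Perm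
        (x :: (List.take (PySem.List.bisectLeft cs x) cs ++ List.drop (PySem.List.bisectLeft cs x) cs)) :=
          List.perm_middle
    _ = x :: cs := by rw [List.take_append_drop]

-- main loop invariant: B's sorted running list is A's final selection, sorted
theorem loop_eq (L M : Int) (order : List (Int × Int)) :
    ∀ (sel : List Int) (used : PySem.Set Int) (chosen : List Int),
    used.Perm sel → chosen.Perm sel → chosen.Pairwise (· ≤ ·) →
    (∀ p ∈ order, p.1 ∉ sel) → (order.map Prod.fst).Nodup →
    hypeAltGo L M order chosen =
      PySem.List.sorted (order.foldl (hypeStep L M) (sel, used)).1 (fun x => x) false := by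
  induction order with
  | nil =>
    intro sel used chosen hup hcp hsort _ _
    simp only [hypeAltGo, List.foldl_nil]
    exact (PySem.List.sorted_id_eq_of_perm_of_pairwise sel chosen hcp hsort).symm
  | cons p rest ih =>
    intro sel used chosen hup hcp hsort hfresh hnodup
    have hlen : chosen.length = sel.length := hcp.length_eq
    simp only [List.map_cons, List.nodup_cons] at hnodup
    obtain ⟨hphd, hnodup'⟩ := hnodup
    simp only [hypeAltGo, List.foldl_cons]
    by_cases hM : (chosen.length : Int) ≥ M
    · rw [if_pos hM]
      have hM' : ((sel).length : Int) ≥ M := by rw [← hlen]; exact hM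
      have hstep : hypeStep L M (sel, used) p = (sel, used) := by
        simp only [hypeStep]; rw [if_pos hM']
      rw [hstep, hypeStep_frozen L M rest (sel, used) hM']
      exact (PySem.List.sorted_id_eq_of_perm_of_pairwise sel chosen hcp hsort).symm
    · rw [if_neg hM]
      have hM' : ¬ ((sel.length : Int) ≥ M) := by rw [← hlen]; exact hM
      have hmemiff : ∀ s, s ∈ used ↔ s ∈ chosen := by
        intro s; rw [hup.mem_iff, hcp.mem_iff]
      by_cases hfar : ∀ s ∈ chosen, |p.1 - s| > L
      · -- accepted by both
        have hcondA : used.all (fun s => decide (|p.1 - s| > L)) = true := by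
          rw [List.all_eq_true]
          intro s hsu
          exact decide_eq_true (hfar s ((hmemiff s).mp hsu))
        have hstep : hypeStep L M (sel, used) p = (sel ++ [p.1], PySem.Set.add used p.1) := by
          simp only [hypeStep]; rw [if_neg hM', if_pos hcondA]
        obtain ⟨hnb1, hnb2⟩ := (far_iff chosen p.1 L hsort).mp hfar
        rw [if_neg hnb1, if_neg hnb2, hstep]
        have hle : PySem.List.bisectLeft chosen p.1 ≤ chosen.length :=
          (PySem.List.bisectLeft_spec chosen p.1 hsort).1
        have hpnotused : p.1 ∉ used := fun hc =>
          hfresh p (List.mem_cons_self) (hup.mem_iff.mp hc)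
        have hadd : PySem.Set.add used p.1 = used ++ [p.1] :=
          PySem.Set.add_of_not_mem hpnotused
        rw [hadd]
        apply ih (sel ++ [p.1]) (used ++ [p.1]) (PySem.List.insert chosen _ p.1)
        · exact hup.append_right [p.1]
        · exact (insert_bisect_perm chosen p.1 hle).trans
            ((hcp.cons p.1).trans (List.perm_append_singleton p.1 sel).symm)
        · exact insert_bisect_pairwise chosen p.1 hsort
        · intro q hq hqmem
          rcases List.mem_append.mp hqmem with h | h
          · exact hfresh q (List.mem_cons_of_mem p hq) h
          · simp only [List.mem_singleton] at h
            exact hphd (h ▸ List.mem_map_of_mem hq)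
        · exact hnodup'
      · -- rejected by both
        have hex : ∃ s ∈ chosen, ¬(|p.1 - s| > L) := by
          by_contra hc; push Not at hc; exact hfar hc
        have hcondA : used.all (fun s => decide (|p.1 - s| > L)) = false := by
          rw [List.all_eq_false]
          obtain ⟨s, hsc, hns⟩ := hex
          exact ⟨s, (hmemiff s).mpr hsc, by simpa using hns⟩
        have hstep : hypeStep L M (sel, used) p = (sel, used) := by
          simp only [hypeStep]; rw [if_neg hM', hcondA]; simp
        rw [hstep]
        by_cases h1 : 0 < PySem.List.bisectLeft chosen p.1 ∧
            p.1 - chosen.getD (PySem.List.bisectLeft chosen p.1 - 1) 0 ≤ L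
        · rw [if_pos h1]
          exact ih sel used chosen hup hcp hsort
            (fun q hq => hfresh q (List.mem_cons_of_mem p hq)) hnodup'
        · rw [if_neg h1]
          have h2 : PySem.List.bisectLeft chosen p.1 < chosen.length ∧
              chosen.getD (PySem.List.bisectLeft chosen p.1) 0 - p.1 ≤ L := by
            by_contra h2
            exact hfar ((far_iff chosen p.1 L hsort).mpr ⟨h1, h2⟩)
          rw [if_pos h2]
          exact ih sel used chosen hup hcp hsort
            (fun q hq => hfresh q (List.mem_cons_of_mem p hq)) hnodup'

-- the seconds of the score-sorted item list are pairwise distinct (dict keys)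
theorem sorted_items_keys_nodup (hs : List (Int × Int)) :
    ((PySem.List.sorted (PySem.Dict.ofList hs).items (fun x => x.2) true).map Prod.fst).Nodup := by
  have hperm : (PySem.List.sorted (PySem.Dict.ofList hs).items (fun x => x.2) true).Perm
      (PySem.Dict.ofList hs).items := PySem.List.sorted_perm _ _ _
  have := PySem.Dict.nodup_keys_ofList hs
  exact ((hperm.map Prod.fst).nodup_iff).mpr this

-- ===== VERDICT (by name: the statement is the Claim_ definition above) =====
theorem get_top_hype_moments_spec : Claim_equal_get_top_hype_moments := by
  intro hype_scores clip_length max_clips _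
  unfold Spec_get_top_hype_moments get_top_hype_moments get_top_hype_moments_alt
  exact (loop_eq clip_length max_clips
    (PySem.List.sorted (PySem.Dict.ofList hype_scores).items (fun x => x.2) true)
    [] PySem.Set.empty [] (List.Perm.refl _) (List.Perm.refl _) List.Pairwise.nil
    (by simp) (sorted_items_keys_nodup hype_scores)).symm
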